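-- pv_equiv track=rewrite | github.com/pneumocystosis/projet_mdp_NSI | projet mdp sombre.py | hasUpperLower
-- ===== SOURCE A (Python) =====
-- def hasUpperLower(mdp1string):
--     hasUpper, hasLower=False, False
--     for both in mdp1string:
--         if both.isupper():
--             #isUpper est une fonction prédéfinie
--             hasUpper=True
--         if both.islower():
--             #isLower est une fonction prédéfinie
--             hasLower=True
--     if hasLower and hasUpper:
--         return True
-- ===== SOURCE B (Python) =====
-- def hasUpperLower(mdp1string):
--     if any(c.isupper() for c in mdp1string) and any(c.islower() for c in mdp1string):
--         return True
-- ===== Notes on version B (the rewrite author's own statement) =====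
-- stated objective: idiomatic
-- what changed: Replaces the flag-accumulating full-pass loop with two independent short-circuiting any() scans wrapped in one bare if, preserving the True/None return shape.
import Mathlib
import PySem

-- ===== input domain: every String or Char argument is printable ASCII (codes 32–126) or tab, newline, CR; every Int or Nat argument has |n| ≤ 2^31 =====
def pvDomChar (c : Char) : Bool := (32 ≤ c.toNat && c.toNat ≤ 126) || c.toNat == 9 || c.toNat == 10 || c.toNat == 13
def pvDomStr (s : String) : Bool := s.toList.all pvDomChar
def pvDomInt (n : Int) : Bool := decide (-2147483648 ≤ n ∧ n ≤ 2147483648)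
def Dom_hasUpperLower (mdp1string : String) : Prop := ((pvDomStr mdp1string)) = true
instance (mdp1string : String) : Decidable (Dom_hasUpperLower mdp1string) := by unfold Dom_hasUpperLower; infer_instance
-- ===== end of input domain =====

-- B replaces A's flag-accumulating full-pass loop with two short-circuiting any-scans (idiomatic); return value True / None is unchanged.

-- ===== PORT A =====
-- A: one loop maintaining (hasUpper, hasLower) flags, then `if hasLower and hasUpper: return True` (else falls off returning None)
def hasUpperLower (mdp1string : String) : Option Bool :=
  let st := mdp1string.toList.foldl
    (fun (s : Bool × Bool) both =>
      let s := if PySem.Chars.isupper both then (true, s.2) else s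
      if PySem.Chars.islower both then (s.1, true) else s)
    (false, false)
  if st.2 && st.1 then some true else none

-- ===== PORT B =====
-- B: `if any(isupper) and any(islower): return True`, falling off to None
def hasUpperLower_alt (mdp1string : String) : Option Bool :=
  if mdp1string.toList.any PySem.Chars.isupper && mdp1string.toList.any PySem.Chars.islower then
    some true
  else none

-- ===== PRECONDITION & SPEC =====
def Spec_hasUpperLower (mdp1string : String) (out : Option Bool) : Prop := out = hasUpperLower_alt mdp1string
instance (mdp1string : String) (out : Option Bool) : Decidable (Spec_hasUpperLower mdp1string out) := by unfold Spec_hasUpperLower; infer_instance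

-- ===== CLAIM (what is proved, stated in full; the proofs are below) =====
def Claim_equal_hasUpperLower : Prop := ∀ (mdp1string : String), Dom_hasUpperLower mdp1string → Spec_hasUpperLower mdp1string (hasUpperLower mdp1string)

-- ===== LEMMAS AND PROOFS =====

-- A's fold computes the pair of any-scans, starting from any initial flags
theorem pvFold_eq_any (l : List Char) (u v : Bool) :
    l.foldl
      (fun (s : Bool × Bool) both =>
        let s := if PySem.Chars.isupper both then (true, s.2) else s
        if PySem.Chars.islower both then (s.1, true) else s)
      (u, v)
    = (u || l.any PySem.Chars.isupper, v || l.any PySem.Chars.islower) := by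
  induction l generalizing u v with
  | nil => simp
  | cons c tl ih =>
    simp only [List.foldl_cons, List.any_cons]
    by_cases hu : PySem.Chars.isupper c <;> by_cases hl : PySem.Chars.islower c <;>
      simp [hu, hl, ih]

-- ===== VERDICT (by name: the statement is the Claim_ definition above) =====
theorem hasUpperLower_spec : Claim_equal_hasUpperLower := by
  intro s _
  unfold Spec_hasUpperLower hasUpperLower hasUpperLower_alt
  simp only [pvFold_eq_any, Bool.false_or]
  rw [Bool.and_comm]
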